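-- pv_equiv track=rewrite | github.com/Glakra/MATHWIZ | streamlit_app/Grades/Year 5/W.Three-dimensional_figures/threedimensional_figures_viewed_from_different_perspectives.py | proj_side
-- ===== SOURCE A (Python) =====
-- def proj_side(struct):
--     w,d,h = len(struct), len(struct[0]), len(struct[0][0])
--     grid = [[0]*h for _ in range(d)]
--     for y in range(d):
--         maxh = 0
--         for x in range(w):
--             for z in range(h):
--                 if struct[x][y][z]: maxh = max(maxh, z+1)
--         for z in range(maxh): grid[y][h-1-z] = 1
--     return grid
-- ===== SOURCE B (Python) =====
-- def proj_side(struct):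
--     d, h = len(struct[0]), len(struct[0][0])
--     # topmost occupied layer of pillar (layer, y): scan from the top, early exit
--     def top(layer, y):
--         for z in range(h - 1, -1, -1):
--             if layer[y][z]:
--                 return z + 1
--         return 0
--     height = [[top(layer, y) for y in range(d)] for layer in struct]
--     grid = []
--     for y in range(d):
--         maxh = max(row[y] for row in height)
--         grid.append([0] * (h - maxh) + [1] * maxh)
--     return grid
-- ===== Notes on version B (the rewrite author's own statement) =====
-- stated objective: alternative
-- what changed: A's fused per-column scan that mutates individual grid cells is replaced by three separate passes: a heights table giving each pillar's topmost occupied layer (scanned from the top with early exit), a per-column maximum over that table, and a direct bottom-aligned row render [0]*(h-maxh)+[1]*maxh.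
import Mathlib
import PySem

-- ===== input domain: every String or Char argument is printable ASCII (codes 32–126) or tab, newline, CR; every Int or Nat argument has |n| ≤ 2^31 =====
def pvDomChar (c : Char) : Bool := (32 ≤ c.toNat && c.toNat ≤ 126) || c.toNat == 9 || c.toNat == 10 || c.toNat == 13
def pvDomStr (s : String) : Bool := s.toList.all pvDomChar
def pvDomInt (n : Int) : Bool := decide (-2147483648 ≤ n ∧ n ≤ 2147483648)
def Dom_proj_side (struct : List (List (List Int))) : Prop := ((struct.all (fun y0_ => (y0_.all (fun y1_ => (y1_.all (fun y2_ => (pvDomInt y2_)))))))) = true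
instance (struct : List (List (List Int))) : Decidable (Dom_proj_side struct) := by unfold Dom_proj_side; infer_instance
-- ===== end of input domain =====

-- B replaces A's fused per-cell scan by a heights table (topmost occupied layer per
-- pillar, scanned from the top), a per-column max, and a direct bottom-aligned row
-- render [0]*(h-maxh) + [1]*maxh; objective: alternative decomposition (a timing run
-- measured B faster by a constant factor, from the early exit and whole-row builds).

-- ===== PORT A =====
-- Literal transliteration of A. len(struct[0]) / len(struct[0][0]) raise IndexError on
-- empty input — headD [] is the total stand-in, Pre_ excludes those inputs; indexing
-- struct[x][y][z] and grid[y][h-1-z] uses pyGetD/pySetD, exact while Pre_ keeps them in range.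
def proj_side (struct : List (List (List Int))) : List (List Int) :=
  let w : Int := struct.length
  let d : Int := (struct.headD []).length
  let h : Int := ((struct.headD []).headD []).length
  let grid : List (List Int) := (PySem.List.pyRange 0 d 1).map (fun _ => PySem.List.pyRepeat [(0:Int)] h)
  (PySem.List.pyRange 0 d 1).foldl (fun grid y =>
    let maxh : Int := (PySem.List.pyRange 0 w 1).foldl (fun maxh x =>
      (PySem.List.pyRange 0 h 1).foldl (fun maxh z =>
        if PySem.List.pyGetD (PySem.List.pyGetD (PySem.List.pyGetD struct x []) y []) z 0 ≠ 0
        then max maxh (z + 1) else maxh) maxh) 0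
    (PySem.List.pyRange 0 maxh 1).foldl (fun g z =>
      PySem.List.pySetD g y (PySem.List.pySetD (PySem.List.pyGetD g y []) (h - 1 - z) 1)) grid) grid

-- ===== PORT B =====
-- top(layer, y) of Source B: 'for z in range(h-1, -1, -1): if layer[y][z]: return z+1' then
-- 'return 0' — a countdown loop with early return, ported as structural recursion on z+1.
def topGo : Nat → List (List Int) → Int → Int
  | 0, _, _ => 0
  | n + 1, layer, y =>
    if PySem.List.pyGetD (PySem.List.pyGetD layer y []) (n : Int) 0 ≠ 0 then (n : Int) + 1
    else topGo n layer y

def proj_side_alt (struct : List (List (List Int))) : List (List Int) :=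
  let d : Int := (struct.headD []).length
  let h : Int := ((struct.headD []).headD []).length
  let height : List (List Int) :=
    struct.map (fun layer => (PySem.List.pyRange 0 d 1).map (fun y => topGo h.toNat layer y))
  (PySem.List.pyRange 0 d 1).map (fun y =>
    let maxh : Int :=
      (PySem.List.max? (height.map (fun row => PySem.List.pyGetD row y 0)) (fun v => v)).getD 0
    PySem.List.pyRepeat [(0:Int)] (h - maxh) ++ PySem.List.pyRepeat [(1:Int)] maxh)

-- ===== PRECONDITION & SPEC =====
-- Pre_ is exactly A's return domain: struct and struct[0] nonempty (else len() raises
-- IndexError), and every cell struct[x][y][z] with y < d, z < h that the scan touches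
-- exists (when h = 0 no cell is touched, so ragged lists below are then allowed).
def Pre_proj_side (struct : List (List (List Int))) : Prop :=
  struct ≠ [] ∧ (struct.headD []) ≠ [] ∧
  ∀ layer ∈ struct, ∀ j < (struct.headD []).length,
    ((struct.headD []).headD []).length ≤ (layer.getD j []).length
instance (struct : List (List (List Int))) : Decidable (Pre_proj_side struct) := by
  unfold Pre_proj_side; infer_instance

def pvWitness_proj_side : List (List (List Int)) := [[[1, 0], [0, 1]]]

def Spec_proj_side (struct : List (List (List Int))) (out : List (List Int)) : Prop := out = proj_side_alt struct
instance (struct : List (List (List Int))) (out : List (List Int)) : Decidable (Spec_proj_side struct out) := by unfold Spec_proj_side; infer_instance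

-- ===== CLAIM (what is proved, stated in full; the proofs are below) =====
def Claim_equal_proj_side : Prop := ∀ (struct : List (List (List Int))), Dom_proj_side struct → Pre_proj_side struct → Spec_proj_side struct (proj_side struct)

-- ===== LEMMAS AND PROOFS =====

-- Height of the topmost nonzero cell of a pillar, recursing from the bottom.
def tf : List Int → Nat
  | [] => 0
  | v :: rest => if tf rest > 0 then tf rest + 1 else if v ≠ 0 then 1 else 0

lemma tf_le (l : List Int) : tf l ≤ l.length := by
  induction l with
  | nil => simp [tf]
  | cons v rest ih => simp only [tf, List.length_cons]; split_ifs <;> omega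

lemma tf_append_singleton (A : List Int) (v : Int) :
    tf (A ++ [v]) = if v ≠ 0 then A.length + 1 else tf A := by
  induction A with
  | nil => by_cases hv : v ≠ 0 <;> simp [tf, hv]
  | cons a A' ih =>
    by_cases hv : v ≠ 0 <;> simp only [List.cons_append, tf, ih, List.length_cons, hv,
      if_true, if_false, ite_true, ite_false] <;> split_ifs <;> omega

lemma topGo_eq (layer : List (List Int)) (y : Int) : ∀ (n : Nat),
    n ≤ (PySem.List.pyGetD layer y []).length →
    topGo n layer y = ((tf ((PySem.List.pyGetD layer y []).take n) : Nat) : Int) := by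
  intro n
  induction n with
  | zero => intro _; simp [topGo, tf]
  | succ n ih =>
    intro hle
    have hn' : n < (PySem.List.pyGetD layer y []).length := by omega
    have htake : (PySem.List.pyGetD layer y []).take (n + 1)
        = (PySem.List.pyGetD layer y []).take n ++ [(PySem.List.pyGetD layer y [])[n]] := by
      rw [List.take_succ, List.getElem?_eq_getElem hn']
      rfl
    have hget : PySem.List.pyGetD (PySem.List.pyGetD layer y []) (n : Int) 0
        = (PySem.List.pyGetD layer y [])[n] := by
      rw [PySem.List.pyGetD_natCast, List.getD_eq_getElem _ _ hn']
    simp only [topGo]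
    rw [hget, htake, tf_append_singleton]
    have hlen : ((PySem.List.pyGetD layer y []).take n).length = n := by
      simp [List.length_take]
      omega
    by_cases hv : (PySem.List.pyGetD layer y [])[n] ≠ 0
    · rw [if_pos hv, if_pos hv, hlen]
      push_cast
      ring
    · rw [if_neg hv, if_neg hv, ih (by omega)]

-- A's z-scan over an enumerated pillar, with an arbitrary start index and accumulator.
lemma enum_fold_max (l : List Int) : ∀ (s m : Int),
    (PySem.List.enumerate l s).foldl (fun m p => if p.2 ≠ 0 then max m (p.1 + 1) else m) m
      = if tf l = 0 then m else max m (s + (tf l : Int)) := by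
  induction l with
  | nil => intro s m; simp [PySem.List.enumerate_nil, tf]
  | cons v rest ih =>
    intro s m
    rw [PySem.List.enumerate_cons, List.foldl_cons, ih]
    simp only [tf]
    by_cases hv : v ≠ 0 <;> by_cases hr : tf rest > 0 <;>
      simp only [hv, hr] <;> split_ifs <;>
      first
        | (exact absurd rfl (by assumption))
        | (exact (by assumption : False).elim)
        | (push_cast; omega)

-- A's inner z-loop over one pillar equals an update by tf.
lemma zfold_eq (p : List Int) (m : Int) :
    (PySem.List.pyRange 0 (p.length : Int) 1).foldl
        (fun m z => if PySem.List.pyGetD p z 0 ≠ 0 then max m (z + 1) else m) m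
      = if tf p = 0 then m else max m (tf p) := by
  have h1 : (PySem.List.pyRange 0 (p.length : Int) 1).foldl
        (fun m z => if PySem.List.pyGetD p z 0 ≠ 0 then max m (z + 1) else m) m
      = ((PySem.List.pyRange 0 (p.length : Int) 1).map
          (fun j => (j, PySem.List.pyGetD p j 0))).foldl
          (fun m q => if q.2 ≠ 0 then max m (q.1 + 1) else m) m := by
    rw [List.foldl_map]
  rw [h1]
  have h2 : ((PySem.List.pyRange 0 (p.length : Int) 1).map
          (fun j => (j, PySem.List.pyGetD p j 0))) = PySem.List.enumerate p 0 := by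
    rw [PySem.List.enumerate_eq_map_pyRange p 0]
    simp [PySem.List.len_eq]
  rw [h2, enum_fold_max]
  simp

-- A's z-loop reads only the first hn entries of a pillar.
lemma zfold_take (p : List Int) (hn : Nat) (hlen : hn ≤ p.length) (m : Int) :
    (PySem.List.pyRange 0 (hn : Int) 1).foldl
        (fun m z => if PySem.List.pyGetD p z 0 ≠ 0 then max m (z + 1) else m) m
      = if tf (p.take hn) = 0 then m else max m (tf (p.take hn)) := by
  rw [PySem.List.foldl_congr_mem _ _
    (fun m z => if PySem.List.pyGetD (p.take hn) z 0 ≠ 0 then max m (z + 1) else m) m ?_]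
  · have hlt : ((p.take hn).length : Int) = (hn : Int) := by
      simp [List.length_take]
      omega
    rw [← hlt, zfold_eq]
  · intro macc z hz
    obtain ⟨hz0, hzlt⟩ := (PySem.List.mem_pyRange_one).mp hz
    have hzp : z < (p.length : Int) := by omega
    have hzt : z < ((p.take hn).length : Int) := by
      simp [List.length_take]
      omega
    show (if PySem.List.pyGetD p z 0 ≠ 0 then max macc (z + 1) else macc)
      = (if PySem.List.pyGetD (p.take hn) z 0 ≠ 0 then max macc (z + 1) else macc)
    rw [PySem.List.pyGetD_eq_getElem p 0 hz0 hzp, PySem.List.pyGetD_eq_getElem (p.take hn) 0 hz0 hzt,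
      List.getElem_take]

-- Per-column maximum pillar height (Nat form shared by both characterizations).
def colMax (struct : List (List (List Int))) (hn k : Nat) : Nat :=
  struct.foldl (fun m layer => max m (tf ((layer.getD k []).take hn))) 0

lemma foldl_if_max_cast {α : Type} (l : List α) (f : α → Nat) : ∀ (a : Nat),
    l.foldl (fun (m : Int) x => if f x = 0 then m else max m (f x : Int)) (a : Int)
      = ((l.foldl (fun m x => max m (f x)) a : Nat) : Int) := by
  induction l with
  | nil => intro a; rfl
  | cons x t ih =>
    intro a
    simp only [List.foldl_cons]
    by_cases hx : f x = 0
    · simp [hx, ih]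
    · rw [if_neg hx, show (max (a : Int) (f x : Int)) = ((max a (f x) : Nat) : Int) by
        push_cast; omega, ih]

lemma foldl_max_cast {α : Type} (l : List α) (f : α → Nat) : ∀ (a : Nat),
    l.foldl (fun (m : Int) x => max m (f x : Int)) (a : Int)
      = ((l.foldl (fun m x => max m (f x)) a : Nat) : Int) := by
  induction l with
  | nil => intro a; rfl
  | cons x t ih =>
    intro a
    simp only [List.foldl_cons]
    rw [show (max (a : Int) (f x : Int)) = ((max a (f x) : Nat) : Int) by push_cast; omega, ih]

lemma foldl_max_le {α : Type} (l : List α) (f : α → Nat) (c : Nat) : ∀ (a : Nat), a ≤ c →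
    (∀ x ∈ l, f x ≤ c) → l.foldl (fun m x => max m (f x)) a ≤ c := by
  induction l with
  | nil => intro a ha _; simpa using ha
  | cons x t ih =>
    intro a ha hf
    simp only [List.foldl_cons]
    exact ih _ (by have := hf x (by simp); omega) (fun y hy => hf y (by simp [hy]))

lemma colMax_le (struct : List (List (List Int))) (hn k : Nat) :
    colMax struct hn k ≤ hn := by
  unfold colMax
  apply foldl_max_le _ _ _ 0 (Nat.zero_le _)
  intro layer _
  calc tf ((layer.getD k []).take hn) ≤ ((layer.getD k []).take hn).length := tf_le _
    _ ≤ hn := by simp [List.length_take]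

-- A's maxh at column k equals colMax.
lemma maxhA_eq (struct : List (List (List Int))) (hn k : Nat)
    (hc : ∀ layer ∈ struct, hn ≤ (layer.getD k []).length) :
    (PySem.List.pyRange 0 (struct.length : Int) 1).foldl (fun maxh x =>
        (PySem.List.pyRange 0 (hn : Int) 1).foldl
          (fun maxh z =>
            if PySem.List.pyGetD (PySem.List.pyGetD (PySem.List.pyGetD struct x []) (k : Int) []) z 0 ≠ 0
            then max maxh (z + 1) else maxh) maxh) 0
      = ((colMax struct hn k : Nat) : Int) := by
  rw [PySem.List.foldl_pyRange_zero_pyGetD' struct []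
    (fun maxh layer =>
      (PySem.List.pyRange 0 (hn : Int) 1).foldl
        (fun maxh z =>
          if PySem.List.pyGetD (PySem.List.pyGetD layer (k : Int) []) z 0 ≠ 0
          then max maxh (z + 1) else maxh) maxh) 0]
  rw [PySem.List.foldl_congr_mem _ _ (fun (m : Int) layer =>
      if tf ((layer.getD k []).take hn) = 0 then m
      else max m ((tf ((layer.getD k []).take hn) : Nat) : Int)) _ ?_]
  · exact foldl_if_max_cast struct _ 0
  · intro m layer hl
    rw [PySem.List.pyGetD_natCast, zfold_take _ _ (hc layer hl)]

-- B's maxh at column k equals colMax (struct nonempty).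
lemma maxhB_eq (s0 : List (List Int)) (rest : List (List (List Int))) (hn k : Nat)
    (hk : k < s0.length)
    (hc : ∀ layer ∈ (s0 :: rest), hn ≤ (layer.getD k []).length) :
    ((PySem.List.max?
        (((s0 :: rest).map (fun layer =>
            ((List.range s0.length).map (fun (j : Nat) => (j : Int))).map (fun y => topGo hn layer y))).map
          (fun row => PySem.List.pyGetD row (k : Int) 0)) (fun v => v)).getD 0)
      = ((colMax (s0 :: rest) hn k : Nat) : Int) := by
  rw [← PySem.List.pyRange_zero_nat s0.length]
  have hval : ∀ layer ∈ (s0 :: rest),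
      PySem.List.pyGetD ((PySem.List.pyRange 0 (s0.length : Int) 1).map
          (fun y => topGo hn layer y)) (k : Int) 0
        = ((tf ((layer.getD k []).take hn) : Nat) : Int) := by
    intro layer hl
    rw [PySem.List.pyGetD_map_pyRange _ s0.length k 0 hk]
    have := topGo_eq layer (k : Int) hn (by rw [PySem.List.pyGetD_natCast]; exact hc layer hl)
    rw [this, PySem.List.pyGetD_natCast]
  simp only [List.map_map, Function.comp_def]
  rw [List.map_congr_left (fun layer hl => hval layer hl)]
  rw [List.map_cons, PySem.List.max?_id_cons, Option.getD_some, List.foldl_map]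
  have h0 : colMax (s0 :: rest) hn k
      = rest.foldl (fun m layer => max m (tf ((layer.getD k []).take hn)))
          (tf ((s0.getD k []).take hn)) := by
    unfold colMax
    simp [List.foldl_cons]
  rw [h0, ← foldl_max_cast rest (fun layer => tf ((layer.getD k []).take hn))
    (tf ((s0.getD k []).take hn))]

lemma set_getD_self (g : List (List Int)) (k : Nat) : g.set k (g.getD k []) = g := by
  by_cases hk : k < g.length
  · rw [List.getD_eq_getElem _ _ hk]; exact List.set_getElem_self hk
  · rw [List.set_eq_of_length_le (by omega)]

lemma inner_collapse (f : Nat → Nat) : ∀ (L : List Nat) (g : List (List Int)) (k : Nat),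
    L.foldl (fun g j => g.set k ((g.getD k []).set (f j) 1)) g
      = g.set k (L.foldl (fun r j => r.set (f j) 1) (g.getD k [])) := by
  intro L
  induction L with
  | nil => intro g k; exact (set_getD_self g k).symm
  | cons j L' ih =>
    intro g k
    simp only [List.foldl_cons]
    rw [ih]
    have hget : (g.set k ((g.getD k []).set (f j) 1)).getD k [] = (g.getD k []).set (f j) 1 := by
      by_cases hk : k < g.length
      · rw [List.getD_eq_getElem _ _ (by simpa using hk)]
        simp
      · have h1 : g.getD k [] = [] := List.getD_eq_default _ _ (by omega)
        rw [h1, List.set_eq_of_length_le (by omega), h1]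
        simp
    rw [hget, List.set_set]

lemma set_append_left' {α : Type} : ∀ (A B : List α) (n : Nat) (v : α), n < A.length →
    (A ++ B).set n v = A.set n v ++ B := by
  intro A B n v h
  rw [List.set_append]
  simp [h]

lemma set_append_at {α : Type} (A B : List α) (n : Nat) (v : α) (h : A.length = n) :
    (A ++ B).set n v = A ++ B.set 0 v := by
  subst h
  rw [List.set_append]
  simp

lemma foldl_range_set (T : Nat → List Int → List Int) :
    ∀ (n : Nat) (g : List (List Int)), n ≤ g.length →
    (List.range n).foldl (fun g k => g.set k (T k (g.getD k []))) g
      = (List.range n).map (fun k => T k (g.getD k [])) ++ g.drop n := by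
  intro n
  induction n with
  | zero => intro g _; simp
  | succ n ih =>
    intro g hg
    rw [List.range_succ, List.foldl_append, List.foldl_cons, List.foldl_nil,
      ih g (by omega)]
    have hmlen : ((List.range n).map (fun k => T k (g.getD k []))).length = n := by simp
    have hdrop : g.drop n = g[n] :: g.drop (n + 1) := List.drop_eq_getElem_cons (by omega)
    have hget : ((List.range n).map (fun k => T k (g.getD k [])) ++ g.drop n).getD n []
        = g.getD n [] := by
      have hnlt : n < ((List.range n).map (fun k => T k (g.getD k [])) ++ g.drop n).length := by
        rw [List.length_append, hmlen, List.length_drop]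
        omega
      rw [List.getD_eq_getElem _ _ hnlt, List.getD_eq_getElem _ _ (show n < g.length by omega)]
      rw [List.getElem_append_right (hmlen.le)]
      simp only [hmlen, Nat.sub_self, List.getElem_drop, Nat.add_zero]
    rw [hget, set_append_at _ _ _ _ hmlen, hdrop, List.set_cons_zero]
    simp

lemma set_replicate_last : ∀ (m : Nat), (List.replicate (m + 1) (0:Int)).set m 1
    = List.replicate m (0:Int) ++ [1] := by
  intro m
  induction m with
  | zero => rfl
  | succ m ih =>
    rw [show m + 1 + 1 = (m + 1) + 1 from rfl, List.replicate_succ, List.set_cons_succ, ih,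
      List.replicate_succ]
    rfl

lemma fill_row (hn : Nat) : ∀ (t : Nat), t ≤ hn →
    (List.range t).foldl (fun r j => r.set (hn - 1 - j) 1) (List.replicate hn (0:Int))
      = List.replicate (hn - t) (0:Int) ++ List.replicate t 1 := by
  intro t
  induction t with
  | zero => intro _; simp
  | succ t ih =>
    intro ht
    rw [List.range_succ, List.foldl_append, List.foldl_cons, List.foldl_nil, ih (by omega)]
    rw [set_append_left' _ _ _ _ (by simp; omega)]
    have h3 : List.replicate (hn - t) (0:Int) = List.replicate ((hn - 1 - t) + 1) 0 := by
      congr 1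
      omega
    rw [h3, set_replicate_last (hn - 1 - t), List.append_assoc,
      show hn - 1 - t = hn - (t + 1) from by omega]
    simp [List.replicate_succ]

-- Characterization of A's result.
lemma projA_eq (struct : List (List (List Int)))
    (hc : ∀ layer ∈ struct, ∀ j < (struct.headD []).length,
      ((struct.headD []).headD []).length ≤ (layer.getD j []).length) :
    proj_side struct = (List.range (struct.headD []).length).map (fun k =>
      List.replicate (((struct.headD []).headD []).length
          - colMax struct ((struct.headD []).headD []).length k) (0:Int)
        ++ List.replicate (colMax struct ((struct.headD []).headD []).length k) 1) := by
  simp only [proj_side]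
  have hgrid0 : (PySem.List.pyRange 0 (((struct.headD []).length : Nat) : Int) 1).map
        (fun _ => PySem.List.pyRepeat [(0:Int)] ((((struct.headD []).headD []).length : Nat) : Int))
      = List.replicate (struct.headD []).length
          (List.replicate ((struct.headD []).headD []).length (0:Int)) := by
    rw [PySem.List.pyRange_zero_nat, List.map_map]
    simp [PySem.List.pyRepeat_singleton, Function.comp_def, List.map_const']
  rw [hgrid0, PySem.List.pyRange_zero_nat (struct.headD []).length, List.foldl_map]
  rw [PySem.List.foldl_congr_mem (List.range (struct.headD []).length) _
    (fun g k => g.set k ((List.range (colMax struct ((struct.headD []).headD []).length k)).foldl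
      (fun r j => r.set (((struct.headD []).headD []).length - 1 - j) 1) (g.getD k []))) _ ?_]
  · rw [foldl_range_set (fun k r =>
        (List.range (colMax struct ((struct.headD []).headD []).length k)).foldl
          (fun r j => r.set (((struct.headD []).headD []).length - 1 - j) 1) r)
      (struct.headD []).length _ (by simp)]
    rw [List.drop_replicate]
    simp only [Nat.sub_self, List.replicate_zero, List.append_nil]
    apply List.map_congr_left
    intro k hk
    have hk' : k < (struct.headD []).length := List.mem_range.mp hk
    rw [List.getD_replicate _ hk']
    exact fill_row _ _ (colMax_le struct _ k)
  · intro g k hk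
    have hk' : k < (struct.headD []).length := List.mem_range.mp hk
    rw [maxhA_eq struct ((struct.headD []).headD []).length k
        (fun layer hl => hc layer hl k hk'),
      PySem.List.pyRange_zero_nat (colMax struct ((struct.headD []).headD []).length k),
      List.foldl_map]
    rw [PySem.List.foldl_congr_mem
      (List.range (colMax struct ((struct.headD []).headD []).length k)) _
      (fun g j => g.set k ((g.getD k []).set (((struct.headD []).headD []).length - 1 - j) 1)) g ?_]
    · exact inner_collapse _ _ g k
    · intro g' j hj
      have hj' : j < colMax struct ((struct.headD []).headD []).length k := List.mem_range.mp hj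
      have hle := colMax_le struct ((struct.headD []).headD []).length k
      rw [show ((((struct.headD []).headD []).length : Int) - 1 - (j : Int))
          = (((((struct.headD []).headD []).length - 1 - j : Nat)) : Int) from by omega]
      simp [PySem.List.pySetD_natCast, PySem.List.pyGetD_natCast]

-- Characterization of B's result.
lemma projB_eq (s0 : List (List Int)) (rest : List (List (List Int)))
    (hc : ∀ layer ∈ (s0 :: rest), ∀ j < s0.length,
      (s0.headD []).length ≤ (layer.getD j []).length) :
    proj_side_alt (s0 :: rest) = (List.range s0.length).map (fun k =>
      List.replicate ((s0.headD []).length - colMax (s0 :: rest) (s0.headD []).length k) (0:Int)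
        ++ List.replicate (colMax (s0 :: rest) (s0.headD []).length k) 1) := by
  simp only [proj_side_alt, List.headD_cons, Int.toNat_natCast]
  rw [PySem.List.pyRange_zero_nat s0.length, List.map_map]
  apply List.map_congr_left
  intro k hk
  have hk' : k < s0.length := List.mem_range.mp hk
  have hle := colMax_le (s0 :: rest) (s0.headD []).length k
  simp only [Function.comp_apply]
  rw [maxhB_eq s0 rest (s0.headD []).length k hk' (fun layer hl => hc layer hl k hk'),
    PySem.List.pyRepeat_singleton, PySem.List.pyRepeat_singleton]
  rw [show (((s0.headD []).length : Int)
        - ((colMax (s0 :: rest) (s0.headD []).length k : Nat) : Int)).toNat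
      = (s0.headD []).length - colMax (s0 :: rest) (s0.headD []).length k from by omega]
  rw [Int.toNat_natCast]

-- ===== VERDICT (by name: the statement is the Claim_ definition above) =====
theorem proj_side_spec : Claim_equal_proj_side := by
  intro struct _ hpre
  obtain ⟨hne, hne0, hc⟩ := hpre
  unfold Spec_proj_side
  obtain ⟨s0, rest, rfl⟩ : ∃ s0 rest, struct = s0 :: rest := by
    cases struct with
    | nil => exact absurd rfl hne
    | cons a l => exact ⟨a, l, rfl⟩
  rw [projA_eq _ hc, projB_eq s0 rest (by simpa using hc)]
  simp
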